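-- pv_equiv track=rewrite | github.com/Feng-12138/Poker-Calculation | scripts/probScripts/calc_v1.py | check_count
-- ===== SOURCE A (Python) =====
-- def check_count(cardNums):
--     countDict = {}
--     for num in cardNums:
--         if num in countDict:
--             countDict[num] += 1
--         else:
--             countDict[num] = 1
--     maxCount = max(countDict.values())
--     countPair = 0
--     for val in countDict.values():
--         if val == 2:
--             countPair += 1
--
--     tieBreakerDict = {}
--     for key in countDict:
--         val = countDict[key]
--         if val in tieBreakerDict:
--             tieBreakerDict[val].append(key)
--         else:
--             tieBreakerDict[val] = [key]
--     for key in tieBreakerDict: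
--         tieBreakerDict[key].sort()
--         tieBreakerDict[key] = tieBreakerDict[key][::-1]
--         tieBreakerDict[key] = tuple(tieBreakerDict[key])
--
--     return maxCount, countPair, tieBreakerDict
-- ===== SOURCE B (Python) =====
-- def check_count(cardNums):
--     counts = {}
--     maxCount = 0
--     countPair = 0
--     for num in cardNums:
--         c = counts.get(num, 0) + 1
--         counts[num] = c
--         if c > maxCount:
--             maxCount = c
--         if c == 2:
--             countPair += 1
--         elif c == 3:
--             countPair -= 1
--     tieBreakerDict = {
--         c: tuple(sorted((k for k, v in counts.items() if v == c), reverse=True))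
--         for c in dict.fromkeys(counts.values())
--     }
--     return maxCount, countPair, tieBreakerDict
-- ===== Notes on version B (the rewrite author's own statement) =====
-- stated objective: alternative
-- what changed: A makes three separate passes over the counts (max of values, pair-count loop, group-by-count loop followed by sorting and reversing each group); B fuses maxCount and countPair into the single counting loop as incrementally maintained accumulators (+1 when a count reaches 2, -1 when it leaves 2) and builds the tie-breaker dict directly as a comprehension over the distinct counts with a per-count filtered descending sort, so A's grouping loop and per-group sort/reverse phase disappear.
import Mathlib
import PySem

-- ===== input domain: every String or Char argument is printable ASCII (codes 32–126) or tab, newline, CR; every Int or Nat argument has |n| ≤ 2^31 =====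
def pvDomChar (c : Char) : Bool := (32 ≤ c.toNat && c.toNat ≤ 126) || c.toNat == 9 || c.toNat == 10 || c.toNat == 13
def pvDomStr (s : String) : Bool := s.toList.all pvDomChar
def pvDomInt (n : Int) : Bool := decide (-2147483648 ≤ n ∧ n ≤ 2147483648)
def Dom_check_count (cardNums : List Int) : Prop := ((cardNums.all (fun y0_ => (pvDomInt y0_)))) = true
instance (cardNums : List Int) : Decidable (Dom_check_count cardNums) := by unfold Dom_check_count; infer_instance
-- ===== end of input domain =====

-- B fuses A's three value passes (max, pair count) into the single counting loop — maxCount and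
-- countPair are maintained incrementally as each card's count is bumped — and replaces A's
-- group-then-sort-each-group dict building by a direct comprehension over the distinct counts
-- (objective: alternative).

-- ===== PORT A =====
-- literal port of A: count loop with contains-branch, max over values, pair-count loop,
-- group-by-count loop, then per-group sort + [::-1] (full-list [::-1] = reverse)
def check_count (cardNums : List Int) : Int × Int × (List (Int × List Int)) :=
  let countDict : PySem.Dict Int Int := cardNums.foldl
    (fun d num => if d.contains num then d.modify num 0 (· + 1) else d.insert num 1)
    PySem.Dict.empty
  let maxCount : Int := (PySem.List.max? countDict.values (fun v => v)).getD 0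
  let countPair : Int := countDict.values.foldl (fun acc v => if v == 2 then acc + 1 else acc) 0
  let tb : PySem.Dict Int (List Int) := countDict.keys.foldl
    (fun t key =>
      let v := countDict.getD key 0
      if t.contains v then t.modify v [] (· ++ [key]) else t.insert v [key])
    PySem.Dict.empty
  (maxCount, countPair,
    tb.items.map (fun p => (p.1, (PySem.List.sorted p.2 (fun x => x) false).reverse)))

-- ===== PORT B =====
-- the body of Source B's single loop: bump the card's count, update the running max,
-- and adjust the pair counter when a count becomes 2 or leaves 2
def pvStepB (s : PySem.Dict Int Int × Int × Int) (num : Int) : PySem.Dict Int Int × Int × Int :=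
  let c := s.1.getD num 0 + 1
  (s.1.insert num c,
   (if c > s.2.1 then c else s.2.1),
   (if c == 2 then s.2.2 + 1 else if c == 3 then s.2.2 - 1 else s.2.2))

-- literal port of Source B: one fused pass producing (counts, maxCount, countPair), then a dict
-- comprehension over dict.fromkeys(counts.values()) with a per-count filtered descending sort
def check_count_alt (cardNums : List Int) : Int × Int × (List (Int × List Int)) :=
  let st := cardNums.foldl pvStepB (PySem.Dict.empty, 0, 0)
  let counts := st.1
  (st.2.1, st.2.2,
    (PySem.List.dedup counts.values).map
      (fun c => (c, PySem.List.sorted ((counts.items.filter (fun p => p.2 == c)).map Prod.fst)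
                      (fun x => x) true)))

-- ===== PRECONDITION & SPEC =====
-- Pre_ excludes only the empty list, on which A raises ValueError (max() of an empty sequence).
def Pre_check_count (cardNums : List Int) : Prop := cardNums ≠ []
instance (cardNums : List Int) : Decidable (Pre_check_count cardNums) := by unfold Pre_check_count; infer_instance
def pvWitness_check_count : List Int := [3, 1, 3, 2, 2, -1]

def Spec_check_count (cardNums : List Int) (out : Int × Int × (List (Int × List Int))) : Prop := out = check_count_alt cardNums
instance (cardNums : List Int) (out : Int × Int × (List (Int × List Int))) : Decidable (Spec_check_count cardNums out) := by unfold Spec_check_count; infer_instance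

-- ===== CLAIM (what is proved, stated in full; the proofs are below) =====
def Claim_equal_check_count : Prop := ∀ (cardNums : List Int), Dom_check_count cardNums → Pre_check_count cardNums → Spec_check_count cardNums (check_count cardNums)

-- ===== LEMMAS AND PROOFS =====

-- the multiset of counts: counter(xs).values, written as a map over the distinct cards
def pvV (xs : List Int) : List Int := (PySem.Set.ofList xs).map (fun k => (xs.count k : Int))

theorem pvFoldlExt {α β : Type} {f g : β → α → β} (h : ∀ b a, f b a = g b a)
    (l : List α) (b : β) : l.foldl f b = l.foldl g b := by
  have hfg : f = g := funext fun b => funext fun a => h b a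
  rw [hfg]

theorem pvCountFoldEq (xs : List Int) :
    xs.foldl (fun d num => if d.contains num then d.modify num 0 (· + 1) else d.insert num 1)
      PySem.Dict.empty = PySem.Dict.counter xs := by
  rw [← PySem.Dict.foldl_insert_getD_add_one_eq_counter]
  apply pvFoldlExt
  intro d num
  by_cases hc : d.contains num
  · rw [if_pos hc]; rfl
  · rw [if_neg hc]
    have h0 : d.getD num 0 = 0 := PySem.Dict.getD_of_not_contains d 0 (by simpa using hc)
    rw [h0]; norm_num

theorem pvValuesCounter (xs : List Int) : (PySem.Dict.counter xs).values = pvV xs := by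
  show ((PySem.Dict.counter xs).items.map Prod.snd) = pvV xs
  rw [PySem.Dict.items_counter, List.map_map]
  rfl

theorem pvPairFold (l : List Int) (acc : Int) :
    l.foldl (fun acc v => if v == 2 then acc + 1 else acc) acc
      = acc + (((l.filter (fun v => v == 2)).length : Int)) := by
  induction l generalizing acc with
  | nil => simp
  | cons a l ih =>
    rw [List.foldl_cons, ih]
    by_cases h : a = 2
    · simp [h]; ring
    · simp [h]

theorem pvFoldlMaxShift (l : List Int) (a b : Int) :
    l.foldl max (max a b) = max a (l.foldl max b) := by
  induction l generalizing b with
  | nil => rfl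
  | cons c l ih => rw [List.foldl_cons, List.foldl_cons, max_assoc, ih]

theorem pvFoldlMaxCons (a : Int) (l : List Int) :
    (a :: l).foldl max 0 = max a (l.foldl max 0) := by
  rw [List.foldl_cons, max_comm 0 a, pvFoldlMaxShift]

theorem pvMaxGetD (L : List Int) (h0 : ∀ v ∈ L, 0 ≤ v) (hne : L ≠ []) :
    (PySem.List.max? L (fun y => y)).getD 0 = L.foldl max 0 := by
  cases L with
  | nil => exact absurd rfl hne
  | cons a t =>
    rw [PySem.List.max?_id_cons, Option.getD_some, pvFoldlMaxCons]
    have ha : (0:Int) ≤ a := h0 a (by simp)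
    rw [← pvFoldlMaxShift, max_eq_left ha]

-- the values list after appending one card x: the same distinct-card map,
-- with x's count bumped by one (and x appended as a new card if fresh)
theorem pvVAppend (l : List Int) (x : Int) :
    pvV (l ++ [x]) = (PySem.Set.add (PySem.Set.ofList l) x).map
      (fun k => (l.count k : Int) + (if k = x then 1 else 0)) := by
  unfold pvV
  rw [PySem.Set.ofList_append_singleton]
  apply List.map_congr_left
  intro k _
  rw [List.count_append]
  by_cases hk : k = x
  · simp [hk]
  · simp [hk, Ne.symm hk]

theorem pvMaxAppend (l : List Int) (x : Int) :
    (pvV (l ++ [x])).foldl max 0 = max ((pvV l).foldl max 0) ((l.count x : Int) + 1) := by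
  rw [pvVAppend]
  set K := PySem.Set.ofList l with hK
  set f : Int → Int := fun k => (l.count k : Int) with hf
  set g : Int → Int := fun k => (l.count k : Int) + (if k = x then 1 else 0) with hg
  have hgx : g x = f x + 1 := by simp [hg, hf]
  have hgf : ∀ k, k ≠ x → g k = f k := by intro k hk; simp [hg, hf, hk]
  have hVl : pvV l = K.map f := rfl
  rw [hVl]
  by_cases hx : x ∈ K
  · rw [PySem.Set.add_of_mem hx]
    have hnd : K.Nodup := PySem.Set.nodup_ofList l
    have hperm : K.Perm (x :: K.erase x) := List.perm_cons_erase hx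
    have hxe : x ∉ K.erase x := List.Nodup.not_mem_erase hnd
    have hge : (K.erase x).map g = (K.erase x).map f :=
      List.map_congr_left (fun k hk => hgf k (fun h => hxe (h ▸ hk)))
    have hcx : f x = (l.count x : Int) := rfl
    rw [List.Perm.foldl_op_eq (hperm.map g), List.Perm.foldl_op_eq (hperm.map f)]
    rw [List.map_cons, List.map_cons, pvFoldlMaxCons, pvFoldlMaxCons, hge, hgx, hcx]
    simp only [max_def]
    split_ifs <;> omega
  · have hcx0 : l.count x = 0 := by
      rw [List.count_eq_zero]
      intro hmem
      exact hx ((PySem.Set.mem_ofList _ _).mpr hmem)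
    rw [PySem.Set.add_of_not_mem hx, List.map_append, List.foldl_append]
    have hge : K.map g = K.map f :=
      List.map_congr_left (fun k hk => hgf k (fun h => hx (h ▸ hk)))
    rw [hge, List.map_singleton, hgx, List.foldl_cons, List.foldl_nil]

theorem pvPairAppend (l : List Int) (x : Int) :
    (((pvV (l ++ [x])).filter (fun v => v == 2)).length : Int)
      = (if ((l.count x : Int) + 1) == 2 then (((pvV l).filter (fun v => v == 2)).length : Int) + 1
         else if ((l.count x : Int) + 1) == 3 then (((pvV l).filter (fun v => v == 2)).length : Int) - 1
         else (((pvV l).filter (fun v => v == 2)).length : Int)) := by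
  rw [pvVAppend]
  set P : Int → Bool := fun v => v == 2 with hP
  set K := PySem.Set.ofList l with hK
  set f : Int → Int := fun k => (l.count k : Int) with hf
  set g : Int → Int := fun k => (l.count k : Int) + (if k = x then 1 else 0) with hg
  have hgx : g x = f x + 1 := by simp [hg, hf]
  have hgf : ∀ k, k ≠ x → g k = f k := by intro k hk; simp [hg, hf, hk]
  have hVl : pvV l = K.map f := rfl
  rw [hVl, List.countP_eq_length_filter.symm, List.countP_eq_length_filter.symm]
  have hcx : ((l.count x : Int)) = f x := rfl
  rw [hcx]
  by_cases hx : x ∈ K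
  · rw [PySem.Set.add_of_mem hx]
    have hnd : K.Nodup := PySem.Set.nodup_ofList l
    have hperm : K.Perm (x :: K.erase x) := List.perm_cons_erase hx
    have hxe : x ∉ K.erase x := List.Nodup.not_mem_erase hnd
    have hge : (K.erase x).map g = (K.erase x).map f :=
      List.map_congr_left (fun k hk => hgf k (fun h => hxe (h ▸ hk)))
    rw [List.Perm.countP_eq P (hperm.map g), List.Perm.countP_eq P (hperm.map f)]
    rw [List.map_cons, List.map_cons, List.countP_cons, List.countP_cons, hge, hgx]
    have hfx : (0:Int) ≤ f x := Int.natCast_nonneg _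
    by_cases h2 : f x + 1 = 2
    · have hne2 : ¬ (f x = 2) := by omega
      simp [hP, h2, hne2]
    · by_cases h3 : f x + 1 = 3
      · have he2 : f x = 2 := by omega
        simp [hP, he2]
      · have hne2 : ¬ (f x = 2) := by omega
        simp [hP, h2, h3, hne2]
  · have hcx0 : l.count x = 0 := by
      rw [List.count_eq_zero]
      intro hmem
      exact hx ((PySem.Set.mem_ofList _ _).mpr hmem)
    have hfx0 : f x = 0 := by simp [hf, hcx0]
    rw [PySem.Set.add_of_not_mem hx, List.map_append]
    have hge : K.map g = K.map f :=
      List.map_congr_left (fun k hk => hgf k (fun h => hx (h ▸ hk)))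
    rw [List.countP_append, hge, List.map_singleton, hgx, hfx0]
    simp [hP]

-- invariant of Source B's fused loop: after processing xs the state is
-- (Counter(xs), max of its values with 0, number of values equal to 2)
theorem pvFoldB (xs : List Int) :
    xs.foldl pvStepB (PySem.Dict.empty, 0, 0)
      = (PySem.Dict.counter xs, (pvV xs).foldl max 0,
         (((pvV xs).filter (fun v => v == 2)).length : Int)) := by
  induction xs using List.reverseRecOn with
  | nil => rfl
  | append_singleton l x ih =>
    rw [List.foldl_append, ih, List.foldl_cons, List.foldl_nil]
    unfold pvStepB
    have hc : (PySem.Dict.counter l).getD x 0 = (l.count x : Int) := PySem.Dict.getD_counter l x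
    have hdict : (PySem.Dict.counter l).insert x ((PySem.Dict.counter l).getD x 0 + 1)
        = PySem.Dict.counter (l ++ [x]) := by
      rw [← PySem.Dict.foldl_insert_getD_add_one_eq_counter,
          ← PySem.Dict.foldl_insert_getD_add_one_eq_counter, List.foldl_append,
          List.foldl_cons, List.foldl_nil]
    dsimp only
    rw [hdict, hc, pvMaxAppend, pvPairAppend]
    have hmax : ∀ a b : Int, (if b > a then b else a) = max a b := by
      intro a b
      rcases max_cases a b with ⟨h1, h2⟩ | ⟨h1, h2⟩ <;> rw [h1] <;> split_ifs <;> omega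
    rw [hmax]

-- the nodup key surgery lemmas for the tie-breaker dict, shared by both sides
theorem pvSortedRevEq (xs : List Int) (h : xs.Nodup) :
    (PySem.List.sorted xs (fun x => x) false).reverse = PySem.List.sorted xs (fun x => x) true := by
  symm
  apply PySem.List.sorted_rev_eq_of_perm_of_pairwise_gt
  · exact (List.reverse_perm _).trans (PySem.List.sorted_perm xs (fun x => x) false)
  · rw [List.pairwise_reverse]
    have h1 := PySem.List.sorted_pairwise xs (fun x => x)
    have h2 : (PySem.List.sorted xs (fun x => x) false).Nodup :=
      ((PySem.List.sorted_perm xs (fun x => x) false).nodup_iff).mpr h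
    exact (h1.and h2).imp (fun hab => lt_of_le_of_ne hab.1 hab.2)

theorem pvGroupSorted (K : List Int) (hK : K.Nodup) (P : Int → Bool) :
    (PySem.List.sorted (K.filter P) (fun x => x) false).reverse
      = PySem.List.sorted (K.filter P) (fun x => x) true :=
  pvSortedRevEq _ (hK.filter P)

-- A's grouping loop + per-group sort/reverse equals B's comprehension over the distinct counts
theorem pvThirdEq (xs : List Int) :
    ((PySem.Dict.counter xs).keys.foldl
        (fun t key =>
          let v := (PySem.Dict.counter xs).getD key 0
          if t.contains v then t.modify v [] (· ++ [key]) else t.insert v [key])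
        PySem.Dict.empty).items.map
      (fun p => (p.1, (PySem.List.sorted p.2 (fun x => x) false).reverse))
    = (PySem.List.dedup (PySem.Dict.counter xs).values).map
        (fun c => (c, PySem.List.sorted
            (((PySem.Dict.counter xs).items.filter (fun p => p.2 == c)).map Prod.fst)
            (fun x => x) true)) := by
  set C := PySem.Dict.counter xs with hC
  have hKnd : C.keys.Nodup := PySem.Dict.nodup_keys_counter xs
  set f : Int → Int := fun k => C.getD k 0 with hf
  -- A's grouping loop is a plain modify-append fold
  have hA : C.keys.foldl
      (fun t key =>
        let v := C.getD key 0
        if t.contains v then t.modify v [] (· ++ [key]) else t.insert v [key])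
      PySem.Dict.empty
      = C.keys.foldl (fun t key => t.modify (f key) [] (· ++ [key])) PySem.Dict.empty := by
    apply pvFoldlExt
    intro t key
    dsimp only
    by_cases hc : t.contains (C.getD key 0)
    · rw [if_pos hc]
    · rw [if_neg hc]
      have h0 : t.getD (C.getD key 0) [] = [] :=
        PySem.Dict.getD_of_not_contains t [] (by simpa using hc)
      have hm : t.modify (f key) [] (· ++ [key])
          = t.insert (f key) (t.getD (f key) [] ++ [key]) := rfl
      rw [hm, hf, h0, List.nil_append]
  rw [hA]
  set DA := C.keys.foldl (fun t key => t.modify (f key) [] (· ++ [key])) PySem.Dict.empty with hDA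
  have hkeysA : DA.keys = PySem.Set.ofList (C.keys.map f) := by
    rw [hDA, PySem.Dict.keys_foldl_modify_key C.keys f [] (fun _ key => (· ++ [key])),
      PySem.Dict.keys_empty]
    rfl
  have hndA : DA.keys.Nodup := by rw [hkeysA]; exact PySem.Set.nodup_ofList _
  have hmapA : (C.keys.map (fun k => (f k, k))).foldl
      (fun (d : PySem.Dict Int (List Int)) p => d.modify p.1 [] (· ++ [p.2]))
      PySem.Dict.empty
      = C.keys.foldl (fun t key => t.modify (f key) [] (· ++ [key])) PySem.Dict.empty :=
    List.foldl_map
  have hDAget : ∀ c : Int, DA.getD c [] = C.keys.filter (fun k => f k == c) := by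
    intro c
    rw [hDA, ← hmapA, PySem.Dict.getD_foldl_modify_append, PySem.Dict.getD_empty,
      List.nil_append, List.filter_map, List.map_map]
    simp only [Function.comp_def, List.map_id']
  -- B's distinct counts are A's grouping keys
  have hvals : C.values = C.keys.map f := PySem.Dict.values_eq_map_keys C hKnd 0
  have hitems : C.items = C.keys.map (fun k => (k, f k)) := PySem.Dict.items_eq_map_keys C hKnd 0
  have hBgroup : ∀ c : Int, (C.items.filter (fun p => p.2 == c)).map Prod.fst
      = C.keys.filter (fun k => f k == c) := by
    intro c
    rw [hitems, List.filter_map, List.map_map]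
    simp only [Function.comp_def, List.map_id']
  rw [PySem.Dict.items_eq_map_keys DA hndA [], hkeysA, List.map_map,
    PySem.List.dedup_eq_ofList, hvals]
  apply List.map_congr_left
  intro c _
  simp only [Function.comp]
  rw [hDAget c, hBgroup c]
  exact congrArg (Prod.mk c) (pvGroupSorted C.keys hKnd (fun k => f k == c))

theorem pvVNonneg (xs : List Int) : ∀ v ∈ pvV xs, 0 ≤ v := by
  intro v hv
  rcases List.mem_map.mp hv with ⟨k, _, rfl⟩
  exact Int.natCast_nonneg _

theorem pvVNe (xs : List Int) (h : xs ≠ []) : pvV xs ≠ [] := by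
  cases xs with
  | nil => exact absurd rfl h
  | cons a t =>
    have : a ∈ PySem.Set.ofList (a :: t) := (PySem.Set.mem_ofList _ _).mpr (by simp)
    exact List.ne_nil_of_mem (List.mem_map_of_mem this)

-- ===== VERDICT (by name: the statement is the Claim_ definition above) =====
theorem check_count_spec : Claim_equal_check_count := by
  intro xs _ hne
  unfold Spec_check_count check_count check_count_alt
  dsimp only
  rw [pvCountFoldEq, pvFoldB]
  dsimp only
  rw [Prod.mk.injEq, Prod.mk.injEq]
  refine ⟨?_, ?_, ?_⟩
  · rw [pvValuesCounter]
    exact pvMaxGetD (pvV xs) (pvVNonneg xs) (pvVNe xs hne)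
  · rw [pvValuesCounter, pvPairFold]; omega
  · exact pvThirdEq xs
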